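-- pv_equiv track=rewrite | github.com/kai0122/kai0122.github.io | generate_tours.py | backtrack
-- ===== SOURCE A (Python) =====
-- SIZE = 7
--
-- KNIGHT_MOVES = [
--     (1, 2), (2, 1),
--     (-1, 2), (-2, 1),
--     (1, -2), (2, -1),
--     (-1, -2), (-2, -1)
-- ]
--
-- def backtrack(path, visited, local_cap, found_branch):
--     # Stop this branch if its quota is reached
--     if local_cap is not None and len(found_branch) >= local_cap:
--         return True  # signal to unwind early
--
--     # If full-length, record the tour
--     if len(path) == SIZE * SIZE:
--         found_branch.append(path.copy())
--         return False  # continue exploring (unless capped)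
--
--     # Warnsdorff heuristic: sort next moves by onward-degree
--     x0, y0 = path[-1]
--     candidates = []
--     for dx, dy in KNIGHT_MOVES:
--         nx, ny = x0 + dx, y0 + dy
--         if 0 <= nx < SIZE and 0 <= ny < SIZE and (nx, ny) not in visited:
--             # count onward moves from (nx,ny)
--             deg = 0
--             for ddx, ddy in KNIGHT_MOVES:
--                 ax, ay = nx + ddx, ny + ddy
--                 if 0 <= ax < SIZE and 0 <= ay < SIZE and (ax, ay) not in visited:
--                     deg += 1
--             candidates.append((deg, nx, ny))
--     candidates.sort(key=lambda c: c[0])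
--
--     # Try each candidate
--     for _, nx, ny in candidates:
--         visited.add((nx, ny))
--         path.append((nx, ny))
--         if backtrack(path, visited, local_cap, found_branch):
--             return True
--         path.pop()
--         visited.remove((nx, ny))
--
--     return False
-- ===== SOURCE B (Python) =====
-- SIZE = 7
--
-- KNIGHT_MOVES = [
--     (1, 2), (2, 1),
--     (-1, 2), (-2, 1),
--     (1, -2), (2, -1),
--     (-1, -2), (-2, -1)
-- ]
--
--
-- def _degree(cell, visited):
--     """Number of legal unvisited knight moves onward from cell."""
--     x, y = cell
--     return sum(1 for dx, dy in KNIGHT_MOVES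
--                if 0 <= x + dx < SIZE and 0 <= y + dy < SIZE and (x + dx, y + dy) not in visited)
--
--
-- def _ordered_moves(cell, visited):
--     """Warnsdorff order: legal unvisited moves from cell, stably sorted by onward-degree."""
--     x0, y0 = cell
--     legal = [(x0 + dx, y0 + dy) for dx, dy in KNIGHT_MOVES
--              if 0 <= x0 + dx < SIZE and 0 <= y0 + dy < SIZE and (x0 + dx, y0 + dy) not in visited]
--     return sorted(legal, key=lambda c: _degree(c, visited))
--
--
-- def backtrack(path, visited, local_cap, found_branch):
--     # Iterative depth-first search over an explicit LIFO stack of pending-move frames.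
--     if local_cap is not None and len(found_branch) >= local_cap:
--         return True
--     if len(path) == SIZE * SIZE:
--         found_branch.append(path.copy())
--         return False
--     stack = [_ordered_moves(path[-1], visited)]
--     while stack:
--         pending = stack[-1]
--         if not pending:
--             stack.pop()
--             if stack:
--                 cell = path.pop()
--                 visited.remove(cell)
--             continue
--         nx, ny = pending.pop(0)
--         visited.add((nx, ny))
--         path.append((nx, ny))
--         if local_cap is not None and len(found_branch) >= local_cap:
--             return True
--         if len(path) == SIZE * SIZE:
--             found_branch.append(path.copy())
--             path.pop()
--             visited.remove((nx, ny))
--             continue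
--         stack.append(_ordered_moves((nx, ny), visited))
--     return False
-- ===== Notes on version B (the rewrite author's own statement) =====
-- stated objective: alternative
-- what changed: Replaces the recursive backtracking by an iterative depth-first search over an explicit LIFO stack of pending-move frames (push a frame on entering a move, pop a frame and undo the move when it is exhausted), with the same Warnsdorff ordering, tour order and in-place mutations.
import Mathlib
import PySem

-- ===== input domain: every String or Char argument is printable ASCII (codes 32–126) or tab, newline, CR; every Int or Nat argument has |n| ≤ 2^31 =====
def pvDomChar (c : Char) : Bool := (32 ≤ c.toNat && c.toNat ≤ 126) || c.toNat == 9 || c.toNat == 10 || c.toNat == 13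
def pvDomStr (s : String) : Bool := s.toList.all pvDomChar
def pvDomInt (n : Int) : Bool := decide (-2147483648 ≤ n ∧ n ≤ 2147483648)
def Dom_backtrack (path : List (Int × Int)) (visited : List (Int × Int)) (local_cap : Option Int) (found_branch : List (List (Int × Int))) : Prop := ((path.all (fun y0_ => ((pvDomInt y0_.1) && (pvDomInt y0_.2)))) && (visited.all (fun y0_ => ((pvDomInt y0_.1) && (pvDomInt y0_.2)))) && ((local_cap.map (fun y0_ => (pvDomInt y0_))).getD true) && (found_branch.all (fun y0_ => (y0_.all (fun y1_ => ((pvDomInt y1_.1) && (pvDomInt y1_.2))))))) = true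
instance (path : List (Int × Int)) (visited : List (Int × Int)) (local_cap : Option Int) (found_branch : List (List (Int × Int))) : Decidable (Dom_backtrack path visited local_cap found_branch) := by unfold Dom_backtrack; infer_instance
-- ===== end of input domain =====

-- B replaces the recursive backtracking by an iterative DFS over an explicit LIFO stack of
-- pending-move frames (objective: alternative decomposition, same search tree and cost).
-- Python A mutates path/visited/found_branch in place; B performs the same mutations, and the
-- equivalence proved here is about the RETURN value only (mutation is threaded state in the ports).

-- ===== PORT A =====
-- shared with B: both Pythons contain this exact cap test and Warnsdorff candidate code
def pvKnight : List (Int × Int) := [(1,2),(2,1),(-1,2),(-2,1),(1,-2),(2,-1),(-1,-2),(-2,-1)]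

def pvOn (x y : Int) : Bool := decide (0 ≤ x) && decide (x < 7) && decide (0 ≤ y) && decide (y < 7)

def pvCapped (local_cap : Option Int) (found : List (List (Int × Int))) : Bool :=
  match local_cap with
  | none => false
  | some c => decide ((found.length : Int) ≥ c)

def pvDeg (nx ny : Int) (visited : List (Int × Int)) : Int :=
  pvKnight.foldl (fun deg d =>
    if pvOn (nx + d.1) (ny + d.2) && !(visited.contains (nx + d.1, ny + d.2)) then deg + 1 else deg) 0

def pvCands (x0 y0 : Int) (visited : List (Int × Int)) : List (Int × Int × Int) :=
  PySem.List.sorted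
    (pvKnight.foldl (fun acc d =>
      if pvOn (x0 + d.1) (y0 + d.2) && !(visited.contains (x0 + d.1, y0 + d.2)) then
        acc ++ [(pvDeg (x0 + d.1) (y0 + d.2) visited, x0 + d.1, y0 + d.2)]
      else acc) [])
    (fun t => t.1)

-- Python always terminates here (each recursive call adds an on-board cell to visited, so the
-- depth is ≤ 50 and entered moves number < 8^51 < 9^50); the fuel is totality scaffolding only.
def pvFuel : Nat := 9 ^ 50

-- A's recursion, found_branch threaded as state; result = (return value, found_branch, fuel left)
mutual
def btA (fuel : Nat) (path visited : List (Int × Int)) (local_cap : Option Int)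
    (found : List (List (Int × Int))) : Bool × List (List (Int × Int)) × Nat :=
  if pvCapped local_cap found then (true, found, fuel)
  else if path.length = 49 then (false, found ++ [path], fuel)
  else
    match PySem.List.pyGet? path (-1) with
    | none => (false, found, fuel)   -- Python raises IndexError here; excluded by Pre_backtrack
    | some c => goA fuel (pvCands c.1 c.2 visited) path visited local_cap found
termination_by 3 * fuel + 1
decreasing_by omega

-- A's candidate loop ('min rem fuel'' is scaffolding: rem ≤ fuel' is proved below, goA_fuel_le)
def goA (fuel : Nat) (cands : List (Int × Int × Int)) (path visited : List (Int × Int))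
    (local_cap : Option Int) (found : List (List (Int × Int))) : Bool × List (List (Int × Int)) × Nat :=
  match cands, fuel with
  | [], _ => (false, found, fuel)
  | _ :: _, 0 => (false, found, 0)
  | t :: cs, fuel' + 1 =>
    match btA fuel' (path ++ [t.2]) (PySem.Set.add visited t.2) local_cap found with
    | (true, f1, rem) => (true, f1, rem)
    | (false, f1, rem) => goA (min rem fuel') cs path visited local_cap f1
termination_by 3 * fuel
decreasing_by
  · omega
  · have := Nat.min_le_right rem fuel'; omega
end

def backtrack (path : List (Int × Int)) (visited : List (Int × Int)) (local_cap : Option Int) (found_branch : List (List (Int × Int))) : Bool :=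
  (btA pvFuel path visited local_cap found_branch).1

-- ===== PORT B =====
-- Source B's _degree: number of legal unvisited onward moves ('sum(1 for ...)' = countP, exact)
def pvDegree (c : Int × Int) (visited : List (Int × Int)) : Int :=
  (pvKnight.countP (fun d =>
    pvOn (c.1 + d.1) (c.2 + d.2) && !(visited.contains (c.1 + d.1, c.2 + d.2))) : Int)

-- Source B's _ordered_moves: the legal-move comprehension (filter + map), then sorted(key=degree)
def pvLegal (cell : Int × Int) (visited : List (Int × Int)) : List (Int × Int) :=
  (pvKnight.filter (fun d =>
    pvOn (cell.1 + d.1) (cell.2 + d.2) && !(visited.contains (cell.1 + d.1, cell.2 + d.2)))).map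
    (fun d => (cell.1 + d.1, cell.2 + d.2))

def pvMoves (cell : Int × Int) (visited : List (Int × Int)) : List (Int × Int) :=
  PySem.List.sorted (pvLegal cell visited) (fun c => pvDegree c visited)

-- Source B's while loop over the explicit stack of pending-move frames
def runB (fuel : Nat) (stack : List (List (Int × Int))) (path visited : List (Int × Int))
    (local_cap : Option Int) (found : List (List (Int × Int))) : Bool × List (List (Int × Int)) :=
  match stack, fuel with
  | [], _ => (false, found)
  | [] :: rest, fu =>
    if rest.isEmpty then (false, found)   -- bottom frame popped: loop ends, return False
    else
      match PySem.List.pop? path with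
      | none => (false, found)       -- Python would raise IndexError; unreachable from backtrack_alt
      | some (cell, path') =>
        match PySem.Set.remove? visited cell with
        | none => (false, found)     -- Python would raise KeyError; unreachable from backtrack_alt
        | some visited' => runB fu rest path' visited' local_cap found
  | (_ :: _) :: _, 0 => (false, found)   -- fuel scaffolding, never reached (see pvFuel)
  | (c :: cs) :: rest, fuel' + 1 =>
    let visited' := PySem.Set.add visited c
    let path' := path ++ [c]
    if pvCapped local_cap found then (true, found)
    else if path'.length = 49 then
      runB fuel' (cs :: rest) path visited local_cap (found ++ [path'])
    else
      runB fuel' (pvMoves c visited' :: cs :: rest) path' visited' local_cap found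
termination_by 2 * fuel + stack.length
decreasing_by all_goals (simp only [List.length_cons]; omega)


def backtrack_alt (path : List (Int × Int)) (visited : List (Int × Int)) (local_cap : Option Int) (found_branch : List (List (Int × Int))) : Bool :=
  if pvCapped local_cap found_branch then true
  else if path.length = 49 then false   -- Source B records the tour in found_branch and returns False
  else
    match PySem.List.pyGet? path (-1) with
    | none => false                      -- Python raises IndexError; excluded by Pre_backtrack
    | some c => (runB pvFuel [pvMoves c visited] path visited local_cap found_branch).1

-- ===== PRECONDITION & SPEC =====
-- Pre_ excludes exactly the inputs where Python A raises IndexError: an empty path while the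
-- cap test does not fire first (an empty path can never be full-length, so only the cap test
-- can return before the last-element lookup raises).
def Pre_backtrack (path : List (Int × Int)) (visited : List (Int × Int)) (local_cap : Option Int) (found_branch : List (List (Int × Int))) : Prop :=
  path ≠ [] ∨ (local_cap ≠ none ∧ local_cap.getD (found_branch.length : Int) ≤ (found_branch.length : Int))
instance (path : List (Int × Int)) (visited : List (Int × Int)) (local_cap : Option Int) (found_branch : List (List (Int × Int))) : Decidable (Pre_backtrack path visited local_cap found_branch) := by unfold Pre_backtrack; infer_instance

def pvWitness_backtrack : (List (Int × Int)) × (List (Int × Int)) × Option Int × (List (List (Int × Int))) :=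
  ([((0:Int),(0:Int))], [((0:Int),(0:Int))], some 0, [])

def Spec_backtrack (path : List (Int × Int)) (visited : List (Int × Int)) (local_cap : Option Int) (found_branch : List (List (Int × Int))) (out : Bool) : Prop := out = backtrack_alt path visited local_cap found_branch
instance (path : List (Int × Int)) (visited : List (Int × Int)) (local_cap : Option Int) (found_branch : List (List (Int × Int))) (out : Bool) : Decidable (Spec_backtrack path visited local_cap found_branch out) := by unfold Spec_backtrack; infer_instance

-- ===== CLAIM (what is proved, stated in full; the proofs are below) =====
def Claim_equal_backtrack : Prop := ∀ (path : List (Int × Int)) (visited : List (Int × Int)) (local_cap : Option Int) (found_branch : List (List (Int × Int))), Dom_backtrack path visited local_cap found_branch → Pre_backtrack path visited local_cap found_branch → Spec_backtrack path visited local_cap found_branch (backtrack path visited local_cap found_branch)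

-- ===== LEMMAS AND PROOFS =====

theorem runB_zero (stack : List (List (Int × Int))) : ∀ (path visited : List (Int × Int))
    (local_cap : Option Int) (found : List (List (Int × Int))),
    runB 0 stack path visited local_cap found = (false, found) := by
  induction stack with
  | nil => intro path visited cap found; rw [runB]
  | cons s rest ih =>
    intro path visited cap found
    cases s with
    | cons c cs => rw [runB]
    | nil =>
      rw [runB]
      by_cases hre : rest.isEmpty
      · rw [if_pos hre]
      · rw [if_neg hre]
        cases hp : PySem.List.pop? path with
        | none => rfl
        | some r =>
          obtain ⟨cell, path'⟩ := r
          cases hr : PySem.Set.remove? visited cell with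
          | none => simp [hr]
          | some visited' => simp only [hr]; exact ih path' visited' cap found

theorem goA_fuel_le (fuel : Nat) : ∀ (cands : List (Int × Int × Int)) (path visited : List (Int × Int))
    (local_cap : Option Int) (found : List (List (Int × Int))),
    (goA fuel cands path visited local_cap found).2.2 ≤ fuel := by
  induction fuel using Nat.strong_induction_on with
  | _ fuel IH =>
    intro cands path visited cap found
    match cands, fuel with
    | [], _ => rw [goA]
    | t :: cs, 0 => rw [goA]
    | t :: cs, fuel' + 1 =>
      rw [goA]
      have hbt : (btA fuel' (path ++ [t.2]) (PySem.Set.add visited t.2) cap found).2.2 ≤ fuel' := by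
        rw [btA, PySem.List.pyGet?_neg_one_append_singleton]
        split_ifs with h1 h2
        · exact le_refl _
        · exact le_refl _
        · exact IH fuel' (Nat.lt_succ_self _) _ _ _ _ _
      cases hb : btA fuel' (path ++ [t.2]) (PySem.Set.add visited t.2) cap found with
      | mk b r2 =>
        obtain ⟨f1, rem⟩ := r2
        have hrem : rem ≤ fuel' := by simpa [hb] using hbt
        cases b with
        | true => simpa using hrem.trans (Nat.le_succ _)
        | false =>
          simp only []
          have := IH (min rem fuel') (by omega) cs path visited cap f1
          omega

theorem pvCands_mem {x0 y0 : Int} {visited : List (Int × Int)} {t : Int × Int × Int}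
    (h : t ∈ pvCands x0 y0 visited) : pvOn t.2.1 t.2.2 = true ∧ visited.contains t.2 = false := by
  rw [pvCands, PySem.List.mem_sorted] at h
  simp only [PySem.List.foldl_append_if, List.nil_append, List.mem_map, List.mem_filter] at h
  obtain ⟨d, ⟨_, hd⟩, rfl⟩ := h
  simp only [Bool.and_eq_true, Bool.not_eq_true'] at hd
  exact ⟨hd.1, hd.2⟩

theorem remove_add {visited : List (Int × Int)} {c : Int × Int}
    (hc : visited.contains c = false) :
    PySem.Set.remove? (PySem.Set.add visited c) c = some visited := by
  have hnm : c ∉ visited := by simpa using hc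
  have hadd : PySem.Set.add visited c = visited ++ [c] := by
    simp only [PySem.Set.add, PySem.Set.contains, hc]
    rfl
  rw [hadd, PySem.Set.remove?_of_mem (by simp)]
  simp only [PySem.Set.discard, List.filter_append, Option.some.injEq]
  have h1 : visited.filter (fun y => !y == c) = visited :=
    List.filter_eq_self.mpr (by intro y hy; simp only [Bool.not_eq_eq_eq_not, Bool.not_true, beq_eq_false_iff_ne, ne_eq]; rintro rfl; exact hnm hy)
  have h2 : [c].filter (fun y => !y == c) = ([] : List (Int × Int)) := by simp
  rw [h1, h2, List.append_nil]

theorem pvDeg_eq (nx ny : Int) (visited : List (Int × Int)) :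
    pvDeg nx ny visited = pvDegree (nx, ny) visited := by
  rw [pvDeg, PySem.List.foldl_if_add_one]
  simp [pvDegree]

theorem insertBy_map_fst (k : Int × Int → Int) (x : Int × Int) (acc : List (Int × Int)) :
    PySem.List.insertBy (fun a b => decide (a.1 < b.1)) (k x, x) (acc.map (fun c => (k c, c)))
      = (PySem.List.insertBy (fun a b => decide (k a < k b)) x acc).map (fun c => (k c, c)) := by
  induction acc with
  | nil => simp [PySem.List.insertBy]
  | cons y ys ih =>
    simp only [List.map_cons, PySem.List.insertBy]
    by_cases h : k x < k y
    · simp [h]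
    · simp [h, ih]

theorem sorted_pairs_snd (k : Int × Int → Int) (xs : List (Int × Int)) :
    (PySem.List.sorted (xs.map (fun c => (k c, c))) (fun t => t.1)).map (fun t => t.2)
      = PySem.List.sorted xs k := by
  rw [PySem.List.sorted_eq_foldl_insertBy, PySem.List.sorted_eq_foldl_insertBy]
  suffices h : ∀ acc : List (Int × Int),
      (List.foldl (fun acc x => PySem.List.insertBy (fun a b => decide (a.1 < b.1)) x acc)
          (acc.map (fun c => (k c, c))) (xs.map (fun c => (k c, c)))).map (fun t => t.2)
        = List.foldl (fun acc x => PySem.List.insertBy (fun a b => decide (k a < k b)) x acc)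
            acc xs by
    simpa using h []
  induction xs with
  | nil => intro acc; simp [Function.comp_def]
  | cons x xs ih =>
    intro acc
    simp only [List.map_cons, List.foldl_cons]
    rw [insertBy_map_fst k x acc]
    exact ih _

theorem pvMoves_eq (cell : Int × Int) (visited : List (Int × Int)) :
    pvMoves cell visited = (pvCands cell.1 cell.2 visited).map (fun t => t.2) := by
  rw [pvMoves, pvCands]
  simp only [PySem.List.foldl_append_if, List.nil_append]
  rw [show (List.map
        (fun d => (pvDeg (cell.1 + d.1) (cell.2 + d.2) visited, cell.1 + d.1, cell.2 + d.2))
        (List.filter (fun d =>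
          pvOn (cell.1 + d.1) (cell.2 + d.2) && !(visited.contains (cell.1 + d.1, cell.2 + d.2)))
          pvKnight))
      = (pvLegal cell visited).map (fun c => (pvDegree c visited, c)) from by
    rw [pvLegal, List.map_map]
    exact List.map_congr_left (fun d _ => by simp [pvDeg_eq])]
  exact (sorted_pairs_snd (fun c => pvDegree c visited) (pvLegal cell visited)).symm

theorem runB_popframe (fuel : Nat) (q : List (Int × Int)) (rs : List (List (Int × Int)))
    (path visited : List (Int × Int)) (cap : Option Int) (found : List (List (Int × Int)))
    (c : Int × Int) (hnv : visited.contains c = false) :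
    runB fuel ([] :: q :: rs) (path ++ [c]) (PySem.Set.add visited c) cap found
      = runB fuel (q :: rs) path visited cap found := by
  conv_lhs => rw [runB]
  simp [PySem.List.pop?_last, remove_add hnv]

theorem runB_goA (fuel : Nat) : ∀ (ts : List (Int × Int × Int)) (rest : List (List (Int × Int)))
    (path visited : List (Int × Int)) (local_cap : Option Int) (found : List (List (Int × Int))),
    (∀ t ∈ ts, pvOn t.2.1 t.2.2 = true ∧ visited.contains t.2 = false) →
    runB fuel (ts.map (fun t => t.2) :: rest) path visited local_cap found =
      (if (goA fuel ts path visited local_cap found).1 then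
        (true, (goA fuel ts path visited local_cap found).2.1)
       else
        runB (goA fuel ts path visited local_cap found).2.2 ([] :: rest) path visited local_cap
          (goA fuel ts path visited local_cap found).2.1) := by
  induction fuel using Nat.strong_induction_on with
  | _ fuel IH =>
    intro ts rest path visited cap found H
    match ts, fuel with
    | [], _ => rw [goA]; simp
    | t :: cs, 0 => rw [goA]; simp [runB_zero]
    | t :: cs, fuel' + 1 =>
      obtain ⟨hon, hnv⟩ := H t (by simp)
      by_cases hcap : pvCapped cap found = true
      · have hbtA : btA fuel' (path ++ [t.2]) (PySem.Set.add visited t.2) cap found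
            = (true, found, fuel') := by
          rw [btA, if_pos hcap]
        rw [goA, hbtA]
        simp only [List.map_cons]
        conv_lhs => rw [runB]
        simp [hcap]
      · by_cases hfull : (path ++ [t.2]).length = 49
        · have hbtA : btA fuel' (path ++ [t.2]) (PySem.Set.add visited t.2) cap found
              = (false, found ++ [path ++ [t.2]], fuel') := by
            rw [btA, if_neg hcap, if_pos hfull]
          rw [goA, hbtA]
          simp only [List.map_cons]
          conv_lhs => rw [runB]
          rw [IH fuel' (Nat.lt_succ_self _) cs rest path visited cap (found ++ [path ++ [t.2]])
            (fun u hu => H u (by simp [hu]))]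
          simp only [if_neg hcap, if_pos hfull, Nat.min_self]
        · have hbtA : btA fuel' (path ++ [t.2]) (PySem.Set.add visited t.2) cap found
              = goA fuel' (pvCands t.2.1 t.2.2 (PySem.Set.add visited t.2)) (path ++ [t.2])
                  (PySem.Set.add visited t.2) cap found := by
            rw [btA, PySem.List.pyGet?_neg_one_append_singleton, if_neg hcap, if_neg hfull]
          cases hb : goA fuel' (pvCands t.2.1 t.2.2 (PySem.Set.add visited t.2)) (path ++ [t.2])
              (PySem.Set.add visited t.2) cap found with
          | mk b r2 =>
            obtain ⟨f1, rem⟩ := r2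
            have hrem : rem ≤ fuel' := by
              have h := goA_fuel_le fuel' (pvCands t.2.1 t.2.2 (PySem.Set.add visited t.2))
                (path ++ [t.2]) (PySem.Set.add visited t.2) cap found
              rw [hb] at h
              exact h
            rw [goA, hbtA, hb]
            simp only [List.map_cons]
            conv_lhs => rw [runB]
            rw [pvMoves_eq t.2 (PySem.Set.add visited t.2)]
            rw [IH fuel' (Nat.lt_succ_self _) (pvCands t.2.1 t.2.2 (PySem.Set.add visited t.2))
              (List.map (fun u => u.2) cs :: rest) (path ++ [t.2]) (PySem.Set.add visited t.2)
              cap found (fun u hu => pvCands_mem hu)]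
            rw [hb]
            cases b with
            | true =>
              simp only [if_neg hcap, if_neg hfull]
              simp
            | false =>
              simp only [if_neg hcap, if_neg hfull]
              rw [Nat.min_eq_left hrem]
              simp only [Bool.false_eq_true, if_false]
              rw [runB_popframe rem (List.map (fun u => u.2) cs) rest path visited cap f1 t.2 hnv]
              rw [IH rem (by omega) cs rest path visited cap f1 (fun u hu => H u (by simp [hu]))]

-- ===== VERDICT (by name: the statement is the Claim_ definition above) =====
theorem backtrack_spec : Claim_equal_backtrack := by
  intro path visited cap found _ hPre
  unfold Spec_backtrack backtrack backtrack_alt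
  rw [btA]
  by_cases hcap : pvCapped cap found = true
  · simp [hcap]
  · rw [if_neg hcap, if_neg hcap]
    by_cases hfull : path.length = 49
    · simp [hfull]
    · rw [if_neg hfull, if_neg hfull]
      have hne : path ≠ [] := by
        rcases hPre with h | ⟨h1, h2⟩
        · exact h
        · exfalso
          apply hcap
          cases cap with
          | none => exact absurd rfl h1
          | some c => simpa [pvCapped] using h2
      cases hg : PySem.List.pyGet? path (-1) with
      | none => rfl   -- (under Pre_ this branch needs no Pre_: both ports return false)
      | some c =>
        show (goA pvFuel (pvCands c.1 c.2 visited) path visited cap found).1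
            = (runB pvFuel [pvMoves c visited] path visited cap found).1
        rw [pvMoves_eq c visited]
        rw [runB_goA pvFuel (pvCands c.1 c.2 visited) [] path visited cap found
          (fun u hu => pvCands_mem hu)]
        cases hb : goA pvFuel (pvCands c.1 c.2 visited) path visited cap found with
        | mk b r2 =>
          obtain ⟨f1, rem⟩ := r2
          cases b with
          | true => simp
          | false =>
            conv_rhs => rw [runB]
            simp
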